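-- pv_equiv track=rewrite | github.com/SanJJJJOk/en_game | module1.py | gibrid_4_values_handler
-- ===== SOURCE A (Python) =====
-- def gibrid_4_values_handler(values):
--     union = []
--     first = values[0]
--     second = values[1]
--     for i in first:
--         for j in second:
--             if len(i)<5 and len(j)<5:
--                 continue
--             if i[-4:] == j[0:4]:
--                 if not j + '-' + i in union:
--                     union.append(i + '-' + j)
--             if i[0:4] == j[-4:]:
--                 if not i + '-' + j in union:
--                     union.append(j + '-' + i)
--     return union
-- ===== SOURCE B (Python) =====
-- def gibrid_4_values_handler(values):
--     first = values[0]
--     second = values[1]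
--     by_prefix = {}
--     by_suffix = {}
--     for idx, j in enumerate(second):
--         by_prefix.setdefault(j[0:4], []).append((idx, j))
--         by_suffix.setdefault(j[-4:], []).append((idx, j))
--     union = []
--     for i in first:
--         pref = by_prefix.get(i[-4:], [])
--         suf = by_suffix.get(i[0:4], [])
--         # merge the two hit-lists back into original second-order, dropping duplicates
--         cands = []
--         p = s = 0
--         while p < len(pref) and s < len(suf):
--             if pref[p][0] < suf[s][0]:
--                 cands.append(pref[p][1]); p += 1
--             elif suf[s][0] < pref[p][0]:
--                 cands.append(suf[s][1]); s += 1
--             else: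
--                 cands.append(pref[p][1]); p += 1; s += 1
--         cands.extend(j for _, j in pref[p:])
--         cands.extend(j for _, j in suf[s:])
--         for j in cands:
--             if len(i) >= 5 or len(j) >= 5:
--                 if i[-4:] == j[0:4] and j + '-' + i not in union:
--                     union.append(i + '-' + j)
--                 if i[0:4] == j[-4:] and i + '-' + j not in union:
--                     union.append(j + '-' + i)
--     return union
-- ===== Notes on version B (the rewrite author's own statement) =====
-- stated objective: faster
-- what changed: B replaces A's full nested scan of second for every i by two hash indexes built once over second (by 4-char prefix and by 4-char suffix); per i it looks up the two hit-lists and merges them back into original second order with a two-pointer merge, applying the same two branches per candidate.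
import Mathlib
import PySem

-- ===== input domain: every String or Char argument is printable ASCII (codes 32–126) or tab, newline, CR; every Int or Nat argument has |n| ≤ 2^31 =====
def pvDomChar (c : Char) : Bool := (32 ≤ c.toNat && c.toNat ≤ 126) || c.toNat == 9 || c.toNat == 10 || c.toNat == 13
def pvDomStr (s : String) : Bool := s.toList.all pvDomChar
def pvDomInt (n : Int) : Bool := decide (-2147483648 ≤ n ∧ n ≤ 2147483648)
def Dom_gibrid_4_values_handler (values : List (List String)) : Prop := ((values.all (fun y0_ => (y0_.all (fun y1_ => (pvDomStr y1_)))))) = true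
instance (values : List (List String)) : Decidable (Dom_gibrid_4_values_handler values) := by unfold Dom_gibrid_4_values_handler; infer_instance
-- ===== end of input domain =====

-- B indexes `second` by 4-char prefix and by 4-char suffix once, then per i merges the two
-- hit-lists back into original order instead of rescanning all of second (objective: faster).

-- ===== PORT A =====
-- the inner-pair step shared by both programs (A's two branch ifs, in A's order)
def pvPairStep (i : String) (union : List String) (j : String) : List String :=
  if PySem.Str.len i < 5 ∧ PySem.Str.len j < 5 then union
  else
    let union :=
      if PySem.Str.slice i (some (-4)) none == PySem.Str.slice j (some 0) (some 4) then
        if !(union.contains (j ++ "-" ++ i)) then union ++ [i ++ "-" ++ j] else union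
      else union
    if PySem.Str.slice i (some 0) (some 4) == PySem.Str.slice j (some (-4)) none then
      if !(union.contains (i ++ "-" ++ j)) then union ++ [j ++ "-" ++ i] else union
    else union

def gibrid_4_values_handler (values : List (List String)) : List String :=
  let first := (PySem.List.pyGet? values 0).getD []
  let second := (PySem.List.pyGet? values 1).getD []
  first.foldl (fun union i => second.foldl (pvPairStep i) union) []

-- ===== PORT B =====
def pvKeyPref (j : String) : String := PySem.Str.slice j (some 0) (some 4)
def pvKeySuf (j : String) : String := PySem.Str.slice j (some (-4)) none

-- the index-building loop: for idx, j in enumerate(second): d.setdefault(key(j), []).append((idx, j))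
def pvBuildIdx (key : String → String) (second : List String) : PySem.Dict String (List (Int × String)) :=
  (PySem.List.enumerate second).foldl (fun d p => d.modify (key p.2) [] (· ++ [p])) PySem.Dict.empty

-- the two-pointer merge (B's while-loop plus the two trailing extends)
def pvMerge : List (Int × String) → List (Int × String) → List String
  | [], ss => ss.map (·.2)
  | p :: ps, [] => (p :: ps).map (·.2)
  | p :: ps, s :: ss =>
    if p.1 < s.1 then p.2 :: pvMerge ps (s :: ss)
    else if s.1 < p.1 then s.2 :: pvMerge (p :: ps) ss
    else p.2 :: pvMerge ps ss
  termination_by ps ss => ps.length + ss.length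

-- B's per-candidate step (Source B's positive guard with combined conditions)
def pvPairStepB (i : String) (union : List String) (j : String) : List String :=
  if 5 ≤ PySem.Str.len i ∨ 5 ≤ PySem.Str.len j then
    let union :=
      if (PySem.Str.slice i (some (-4)) none == PySem.Str.slice j (some 0) (some 4))
          && !(union.contains (j ++ "-" ++ i)) then union ++ [i ++ "-" ++ j] else union
    if (PySem.Str.slice i (some 0) (some 4) == PySem.Str.slice j (some (-4)) none)
        && !(union.contains (i ++ "-" ++ j)) then union ++ [j ++ "-" ++ i] else union
  else union

def gibrid_4_values_handler_alt (values : List (List String)) : List String :=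
  let first := (PySem.List.pyGet? values 0).getD []
  let second := (PySem.List.pyGet? values 1).getD []
  let byPref := pvBuildIdx pvKeyPref second
  let bySuf := pvBuildIdx pvKeySuf second
  first.foldl (fun union i =>
    let cands := pvMerge (byPref.getD (pvKeySuf i) []) (bySuf.getD (pvKeyPref i) [])
    cands.foldl (pvPairStepB i) union) []

-- ===== PRECONDITION & SPEC =====
-- Pre_ excludes only the inputs on which Python A raises IndexError (fewer than two inner lists).
def Pre_gibrid_4_values_handler (values : List (List String)) : Prop := 2 ≤ values.length
instance (values : List (List String)) : Decidable (Pre_gibrid_4_values_handler values) := by unfold Pre_gibrid_4_values_handler; infer_instance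
def pvWitness_gibrid_4_values_handler : List (List String) := [["abcde"], ["cdefg"]]
def Spec_gibrid_4_values_handler (values : List (List String)) (out : List String) : Prop := out = gibrid_4_values_handler_alt values
instance (values : List (List String)) (out : List String) : Decidable (Spec_gibrid_4_values_handler values out) := by unfold Spec_gibrid_4_values_handler; infer_instance

-- ===== CLAIM (what is proved, stated in full; the proofs are below) =====
def Claim_equal_gibrid_4_values_handler : Prop := ∀ (values : List (List String)), Dom_gibrid_4_values_handler values → Pre_gibrid_4_values_handler values → Spec_gibrid_4_values_handler values (gibrid_4_values_handler values)

-- ===== LEMMAS AND PROOFS =====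

-- the candidate test for a fixed i, as a predicate on an enumerated element of second
def pvCand (i : String) (j : String) : Bool :=
  (pvKeyPref j == pvKeySuf i) || (pvKeySuf j == pvKeyPref i)

-- the index lookup returns exactly the filtered enumerate
theorem pvBuildIdx_getD (key : String → String) (second : List String) (c : String) :
    (pvBuildIdx key second).getD c [] =
      (PySem.List.enumerate second).filter (fun p => key p.2 == c) := by
  unfold pvBuildIdx
  have h1 : (PySem.List.enumerate second).foldl (fun d p => d.modify (key p.2) [] (· ++ [p])) PySem.Dict.empty
      = ((PySem.List.enumerate second).map (fun p => (key p.2, p))).foldl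
          (fun d q => d.modify q.1 [] (· ++ [q.2])) PySem.Dict.empty := by
    rw [List.foldl_map]
  rw [h1, PySem.Dict.getD_foldl_modify_append, PySem.Dict.getD_empty, List.nil_append,
    List.filter_map]
  simp [Function.comp_def]

theorem pvMerge_cons_left (a : Int × String) (as bs : List (Int × String))
    (h : ∀ b ∈ bs, a.1 < b.1) : pvMerge (a :: as) bs = a.2 :: pvMerge as bs := by
  cases bs with
  | nil => cases as <;> simp [pvMerge]
  | cons b bs' =>
    have hb := h b (by simp)
    simp [pvMerge, hb]

theorem pvMerge_cons_right (b : Int × String) (as bs : List (Int × String))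
    (h : ∀ a ∈ as, b.1 < a.1) : pvMerge as (b :: bs) = b.2 :: pvMerge as bs := by
  cases as with
  | nil => simp [pvMerge]
  | cons a as' =>
    have ha := h a (by simp)
    have hna : ¬ a.1 < b.1 := by omega
    simp [pvMerge, hna, ha]

-- merging the two filtered hit-lists of a strictly index-increasing list gives the disjunctive filter
theorem pvMerge_filter (p q : Int × String → Bool) (l : List (Int × String))
    (hl : l.Pairwise (fun a b => a.1 < b.1)) :
    pvMerge (l.filter p) (l.filter q) = (l.filter (fun x => p x || q x)).map (·.2) := by
  induction l with
  | nil => simp [pvMerge]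
  | cons x t ih =>
    rcases List.pairwise_cons.mp hl with ⟨hx, ht⟩
    have ih' := ih ht
    by_cases hp : p x = true <;> by_cases hq : q x = true
    · simp only [List.filter_cons, hp, hq, if_pos, Bool.or_self]
      simp only [pvMerge, lt_irrefl, List.map_cons]
      rw [ih']
      simp
    · simp only [List.filter_cons, hp, if_pos]
      rw [if_neg (by simp [hq])]
      rw [pvMerge_cons_left x (t.filter p) (t.filter q)
        (fun b hb => hx b (List.mem_of_mem_filter hb)), ih']
      simp [hq]
    · simp only [List.filter_cons, hq, if_pos]
      rw [if_neg (by simp [hp])]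
      rw [pvMerge_cons_right x (t.filter p) (t.filter q)
        (fun a ha => hx a (List.mem_of_mem_filter ha)), ih']
      simp [hp]
    · have e1 : List.filter p (x :: t) = List.filter p t := by simp [hp]
      have e2 : List.filter q (x :: t) = List.filter q t := by simp [hq]
      have e3 : List.filter (fun y => p y || q y) (x :: t)
          = List.filter (fun y => p y || q y) t := by simp [hp, hq]
      rw [e1, e2, e3, ih']

-- a fold whose step is the identity off pc equals the fold over the filtered list
theorem foldl_eq_foldl_filter {α β : Type} (f : β → α → β) (pc : α → Bool)
    (h : ∀ u j, pc j = false → f u j = u) :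
    ∀ (l : List α) (u : β), l.foldl f u = (l.filter pc).foldl f u := by
  intro l
  induction l with
  | nil => intro u; rfl
  | cons x t ih =>
    intro u
    by_cases hx : pc x = true
    · simp [hx, List.foldl_cons, ih]
    · have hx' : pc x = false := by simpa using hx
      simp [hx', List.foldl_cons, h u x hx', ih]

-- the pair step is the identity on non-candidates
theorem pvPairStep_of_not_cand (i : String) (u : List String) (j : String)
    (h : pvCand i j = false) : pvPairStep i u j = u := by
  unfold pvCand at h
  have h1 : (pvKeyPref j == pvKeySuf i) = false := by
    cases hb : (pvKeyPref j == pvKeySuf i) <;> simp [hb] at h ⊢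
  have h2 : (pvKeySuf j == pvKeyPref i) = false := by
    cases hb : (pvKeySuf j == pvKeyPref i) <;> simp [hb] at h ⊢
  have h1' : ¬ (PySem.Str.slice i (some (-4)) none == PySem.Str.slice j (some 0) (some 4)) := by
    simp only [pvKeyPref, pvKeySuf, beq_iff_eq] at h1 ⊢
    intro he; exact absurd he.symm (by simpa using h1)
  have h2' : ¬ (PySem.Str.slice i (some 0) (some 4) == PySem.Str.slice j (some (-4)) none) := by
    simp only [pvKeyPref, pvKeySuf, beq_iff_eq] at h2 ⊢
    intro he; exact absurd he.symm (by simpa using h2)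
  unfold pvPairStep
  split
  · rfl
  · simp [h1', h2']

-- for each i, B's candidate list is exactly the candidate-filtered second
theorem pvCands_eq (second : List String) (i : String) :
    pvMerge ((pvBuildIdx pvKeyPref second).getD (pvKeySuf i) [])
            ((pvBuildIdx pvKeySuf second).getD (pvKeyPref i) [])
      = second.filter (pvCand i) := by
  rw [pvBuildIdx_getD, pvBuildIdx_getD,
    pvMerge_filter _ _ _ (PySem.List.pairwise_lt_enumerate second 0)]
  have : (PySem.List.enumerate second 0).filter
      (fun x => (pvKeyPref x.2 == pvKeySuf i) || (pvKeySuf x.2 == pvKeyPref i))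
      = (PySem.List.enumerate second 0).filter (fun x => pvCand i x.2) := by
    simp [pvCand]
  rw [this]
  have hfm : ((PySem.List.enumerate second 0).filter (fun x => pvCand i x.2)).map (·.2)
      = ((PySem.List.enumerate second 0).map (·.2)).filter (pvCand i) := by
    rw [List.filter_map]; rfl
  rw [hfm, PySem.List.map_snd_enumerate]

-- B's step computes A's step
theorem pvPairStepB_eq (i : String) (u : List String) (j : String) :
    pvPairStepB i u j = pvPairStep i u j := by
  unfold pvPairStepB pvPairStep
  by_cases h : PySem.Str.len i < 5 ∧ PySem.Str.len j < 5
  · rw [if_pos h, if_neg (by omega)]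
  · rw [if_neg h, if_pos (by omega)]
    cases hA : (PySem.Str.slice i (some (-4)) none == PySem.Str.slice j (some 0) (some 4)) <;>
      cases hC : (PySem.Str.slice i (some 0) (some 4) == PySem.Str.slice j (some (-4)) none) <;>
        simp [hA, hC]

-- ===== VERDICT (by name: the statement is the Claim_ definition above) =====
theorem gibrid_4_values_handler_spec : Claim_equal_gibrid_4_values_handler := by
  intro values _ _
  unfold Spec_gibrid_4_values_handler gibrid_4_values_handler gibrid_4_values_handler_alt
  set second := (PySem.List.pyGet? values 1).getD [] with hsec
  apply PySem.List.foldl_congr_mem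
  intro u i _
  rw [pvCands_eq second i]
  refine (foldl_eq_foldl_filter (pvPairStep i) (pvCand i) (pvPairStep_of_not_cand i) second u).trans ?_
  apply PySem.List.foldl_congr_mem
  intro acc x _
  exact (pvPairStepB_eq i acc x).symm
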